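-- pv_equiv track=rewrite | github.com/rafaeltedesco/data-structures-algorithms-group-study | week-1/challenges/rafatedesco_python/05_merge_the_tools/merge_the_tools.py | merge_the_tools
-- ===== SOURCE A (Python) =====
-- def merge_the_tools(string, k):
--     n = len(string)
--     substrings = []
--     substring = []
--     seen = set()
--     right = 0
--
--     while right < n:
--         char = string[right]
--
--         if char not in seen:
--             seen.add(char)
--             substring.append(char)
--
--         if (right + 1) % k == 0:
--             substrings.append(substring)
--             substring = []
--             seen = set()
--
--         right += 1
--
--     return [''.join(s) for s in substrings]
-- ===== SOURCE B (Python) =====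
-- def merge_the_tools(string, k):
--     n = len(string)
--     return [''.join(dict.fromkeys(string[i:i+k])) for i in range(0, (n // k) * k, k)]
-- ===== Notes on version B (the rewrite author's own statement) =====
-- stated objective: idiomatic
-- what changed: A's flat character-by-character scan with a mutable per-chunk seen-set and modulo boundary detection is replaced by a chunk-first comprehension: iterate over the n//k full chunk starts, slice each length-k chunk and deduplicate it with dict.fromkeys (C-level slicing/dedup instead of a per-character Python loop).
-- outside the precondition, e.g. on merge_the_tools('', 0): A returns [], B raises ZeroDivisionError; on merge_the_tools('abcde', -2): A returns ['ab', 'cd'], B returns []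
import Mathlib
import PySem

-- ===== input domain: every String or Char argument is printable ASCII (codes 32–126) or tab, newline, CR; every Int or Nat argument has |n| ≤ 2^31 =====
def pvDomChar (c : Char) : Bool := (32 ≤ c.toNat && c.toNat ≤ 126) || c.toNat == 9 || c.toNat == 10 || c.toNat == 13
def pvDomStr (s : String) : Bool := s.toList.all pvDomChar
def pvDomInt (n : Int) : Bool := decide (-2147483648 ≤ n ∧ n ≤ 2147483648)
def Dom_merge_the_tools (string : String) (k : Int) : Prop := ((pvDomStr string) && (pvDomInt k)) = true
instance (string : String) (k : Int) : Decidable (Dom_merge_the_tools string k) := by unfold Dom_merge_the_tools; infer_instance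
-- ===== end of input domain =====

-- B replaces A's flat scan (per-chunk seen-set + modulo boundary test) with an idiomatic
-- chunk-first map: slice each of the n//k full chunks and dedup it; same cost, plainer code.


-- ===== PORT A =====
-- A's loop body: update (substring, seen) if the char is unseen, then flush at a chunk boundary.
def pvStepA (k : Int) (st : List (List Char) × List Char × PySem.Set Char) (p : Int × Char) :
    List (List Char) × List Char × PySem.Set Char :=
  let st2 :=
    if PySem.Set.contains st.2.2 p.2 then (st.2.1, st.2.2)
    else (st.2.1 ++ [p.2], PySem.Set.add st.2.2 p.2)
  if PySem.Int.mod (p.1 + 1) k == 0 then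
    (st.1 ++ [st2.1], ([] : List Char), (PySem.Set.empty : PySem.Set Char))
  else (st.1, st2.1, st2.2)

def merge_the_tools (string : String) (k : Int) : List String :=
  let fin := (PySem.List.enumerate string.toList 0).foldl (pvStepA k)
    ([], [], (PySem.Set.empty : PySem.Set Char))
  fin.1.map (fun s => String.mk s)

-- ===== PORT B =====
def merge_the_tools_alt (string : String) (k : Int) : List String :=
  let cs := string.toList
  let n : Int := (cs.length : Int)
  (PySem.List.pyRange 0 (PySem.Int.floordiv n k * k) k).map
    (fun i => String.mk (PySem.List.dedup (PySem.List.slice cs (some i) (some (i + k)))))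

-- ===== PRECONDITION & SPEC =====
-- Pre_ excludes k ≤ 0: for k = 0 A raises ZeroDivisionError on every nonempty string (and B's
-- n // k raises even on the empty one), and for negative k A's chunking by |k| is an accidental
-- corner of Python's modulo sign rule that no caller of this chunking function would specify.
def Pre_merge_the_tools (string : String) (k : Int) : Prop := 1 ≤ k
instance (string : String) (k : Int) : Decidable (Pre_merge_the_tools string k) := by
  unfold Pre_merge_the_tools; infer_instance

def pvWitness_merge_the_tools : String × Int := ("AABCAAADA", 3)

def Spec_merge_the_tools (string : String) (k : Int) (out : List String) : Prop := out = merge_the_tools_alt string k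
instance (string : String) (k : Int) (out : List String) : Decidable (Spec_merge_the_tools string k out) := by unfold Spec_merge_the_tools; infer_instance

-- ===== CLAIM (what is proved, stated in full; the proofs are below) =====
def Claim_equal_merge_the_tools : Prop := ∀ (string : String) (k : Int), Dom_merge_the_tools string k → Pre_merge_the_tools string k → Spec_merge_the_tools string k (merge_the_tools string k)

-- ===== LEMMAS AND PROOFS =====

-- A's loop with `seen` identified with `substring` (they are always equal).
def pvStep (k : Int) (st : List (List Char) × List Char) (p : Int × Char) :
    List (List Char) × List Char :=
  let sub := PySem.Set.add st.2 p.2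
  if PySem.Int.mod (p.1 + 1) k == 0 then (st.1 ++ [sub], []) else (st.1, sub)

-- The reference shape both ports are reduced to: dedup of each full k-chunk, in order.
def pvChunks (K : Nat) (cs : List Char) : List (List Char) :=
  if h : K = 0 ∨ cs.length < K then []
  else PySem.Set.ofList (cs.take K) :: pvChunks K (cs.drop K)
termination_by cs.length
decreasing_by
  simp only [List.length_drop]
  omega

theorem pv_stepA_diag (k : Int) (acc : List (List Char)) (sub : List Char) (p : Int × Char) :
    pvStepA k (acc, sub, sub) p =
      ((pvStep k (acc, sub) p).1, (pvStep k (acc, sub) p).2, (pvStep k (acc, sub) p).2) := by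
  by_cases hc : PySem.Set.contains sub p.2 <;>
    simp [pvStepA, pvStep, PySem.Set.add, hc, PySem.Set.empty] <;> split_ifs <;> simp

theorem pv_fold_diag (k : Int) (l : List (Int × Char)) :
    ∀ (acc : List (List Char)) (sub : List Char),
      l.foldl (pvStepA k) (acc, sub, sub) =
        ((l.foldl (pvStep k) (acc, sub)).1, (l.foldl (pvStep k) (acc, sub)).2,
          (l.foldl (pvStep k) (acc, sub)).2) := by
  induction l with
  | nil => intro acc sub; rfl
  | cons p t ih =>
      intro acc sub
      simp only [List.foldl_cons, pv_stepA_diag]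
      exact ih _ _

theorem pv_noB (k : Int) : ∀ (ds : List Char) (s : Int) (acc : List (List Char)) (sub : List Char),
    (∀ j : Nat, j < ds.length → ¬ (k ∣ s + j + 1)) →
    (PySem.List.enumerate ds s).foldl (pvStep k) (acc, sub) = (acc, ds.foldl PySem.Set.add sub) := by
  intro ds
  induction ds with
  | nil => intro s acc sub _; rfl
  | cons d t ih =>
      intro s acc sub h
      rw [PySem.List.enumerate_cons, List.foldl_cons]
      have hnd : ¬ (PySem.Int.mod (s + 1) k = 0) := by
        intro he
        exact h 0 (by simp) (by simpa using (PySem.Int.mod_eq_zero_iff_dvd _ _).mp he)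
      have hst : pvStep k (acc, sub) (s, d) = (acc, PySem.Set.add sub d) := by
        simp [pvStep, hnd]
      rw [hst, List.foldl_cons]
      exact ih (s + 1) acc (PySem.Set.add sub d) (by
        intro j hj hd
        apply h (j + 1) (by simp; omega)
        have : s + ((j : Int) + 1) + 1 = s + 1 + (j : Int) + 1 := by ring
        rw [Int.natCast_add, Int.natCast_one, this]
        exact hd)

theorem pv_full (k : Int) (hk : 0 < k) (ds : List Char) (s : Int) (acc : List (List Char))
    (hlen : (ds.length : Int) = k) (hs : k ∣ s) :
    (PySem.List.enumerate ds s).foldl (pvStep k) (acc, []) = (acc ++ [PySem.Set.ofList ds], []) := by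
  have hne : ds ≠ [] := by
    intro h0; rw [h0] at hlen; simp at hlen; omega
  have hsplit : ds = ds.dropLast ++ [ds.getLast hne] := (List.dropLast_append_getLast hne).symm
  rw [hsplit, PySem.List.enumerate_append, List.foldl_append]
  rw [pv_noB k _ s acc [] (by
    intro j hj hd
    have hjlt : (j : Int) < k - 1 := by
      have : ds.dropLast.length = ds.length - 1 := by simp
      omega
    have hdvd : k ∣ ((j : Int) + 1) := by
      have : s + (j : Int) + 1 = s + ((j : Int) + 1) := by ring
      rw [this] at hd
      exact (Int.dvd_add_right hs).mp hd
    have := Int.le_of_dvd (by omega) hdvd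
    omega)]
  rw [PySem.List.enumerate_cons, PySem.List.enumerate_nil, List.foldl_cons, List.foldl_nil]
  have hb : PySem.Int.mod (s + ↑ds.dropLast.length + 1) k = 0 := by
    apply (PySem.Int.mod_eq_zero_iff_dvd _ _).mpr
    have h1 : ds.dropLast.length = ds.length - 1 := by simp
    have h2 : (ds.dropLast.length : Int) = k - 1 := by omega
    have : s + ↑ds.dropLast.length + 1 = s + k := by omega
    rw [this]
    exact Int.dvd_add hs dvd_rfl
  simp only [pvStep, hb, beq_self_eq_true, if_true]
  rw [PySem.Set.ofList_eq_foldl, List.foldl_append, List.foldl_cons, List.foldl_nil]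

theorem pv_loop (k : Int) (hk : 0 < k) :
    ∀ (N : Nat) (cs : List Char), cs.length ≤ N → ∀ (s : Int) (acc : List (List Char)), k ∣ s →
    ((PySem.List.enumerate cs s).foldl (pvStep k) (acc, [])).1 = acc ++ pvChunks k.toNat cs := by
  intro N
  induction N with
  | zero =>
      intro cs hcs s acc hs
      have : cs = [] := List.eq_nil_of_length_eq_zero (by omega)
      subst this
      rw [pvChunks, dif_pos (Or.inr (by simp; omega))]
      simp [PySem.List.enumerate_nil]
  | succ N ih =>
      intro cs hcs s acc hs
      by_cases hsmall : cs.length < k.toNat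
      · rw [pvChunks, dif_pos (Or.inr hsmall)]
        rw [pv_noB k cs s acc [] (by
          intro j hj hd
          have hdvd : k ∣ ((j : Int) + 1) := by
            have : s + (j : Int) + 1 = s + ((j : Int) + 1) := by ring
            rw [this] at hd
            exact (Int.dvd_add_right hs).mp hd
          have := Int.le_of_dvd (by omega) hdvd
          omega)]
        simp
      · push_neg at hsmall
        have hK0 : k.toNat ≠ 0 := by omega
        rw [pvChunks, dif_neg (by push_neg; exact ⟨hK0, by omega⟩)]
        have hsplit := (List.take_append_drop k.toNat cs).symm
        conv_lhs => rw [hsplit]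
        rw [PySem.List.enumerate_append, List.foldl_append]
        rw [pv_full k hk _ s acc (by
          rw [List.length_take]
          omega) hs]
        rw [ih (cs.drop k.toNat) (by simp [List.length_drop]; omega) _ _ (by
          have hlt : (cs.take k.toNat).length = k.toNat := by rw [List.length_take]; omega
          have hcast : ((k.toNat : Nat) : Int) = k := by omega
          rw [hlt, hcast]
          exact Int.dvd_add hs dvd_rfl)]
        simp [List.append_assoc]

theorem pv_bchunks (K : Nat) (hK : 0 < K) :
    ∀ (N : Nat) (cs : List Char), cs.length ≤ N →
    (List.range (cs.length / K)).map (fun j => PySem.Set.ofList ((cs.drop (K * j)).take K))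
      = pvChunks K cs := by
  intro N
  induction N with
  | zero =>
      intro cs hcs
      have : cs = [] := List.eq_nil_of_length_eq_zero (by omega)
      subst this
      rw [pvChunks, dif_pos (Or.inr (by simpa using hK))]
      simp
  | succ N ih =>
      intro cs hcs
      by_cases hsmall : cs.length < K
      · rw [pvChunks, dif_pos (Or.inr hsmall)]
        rw [Nat.div_eq_of_lt hsmall]
        simp
      · push_neg at hsmall
        rw [pvChunks, dif_neg (by push_neg; exact ⟨by omega, by omega⟩)]
        rw [Nat.div_eq_sub_div hK hsmall]
        rw [List.range_succ_eq_map, List.map_cons, List.map_map]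
        have h0 : PySem.Set.ofList ((cs.drop (K * 0)).take K) = PySem.Set.ofList (cs.take K) := by
          simp
        rw [h0]
        congr 1
        have hlen : (cs.drop K).length = cs.length - K := by simp [List.length_drop]
        rw [← hlen]
        rw [← ih (cs.drop K) (by simp only [List.length_drop]; omega)]
        apply List.map_congr_left
        intro j _
        simp only [Function.comp_apply]
        congr 1
        rw [List.drop_drop]
        congr 1
        simp only [Nat.succ_eq_add_one]
        ring

theorem pv_alt_eq (string : String) (k : Int) (hk : 1 ≤ k) :
    merge_the_tools_alt string k = (pvChunks k.toNat string.toList).map (fun s => String.mk s) := by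
  unfold merge_the_tools_alt
  dsimp only
  set cs := string.toList with hcs
  set K := k.toNat with hKdefK
  have hkK : k = (K : Int) := by omega
  have hKpos : 0 < K := by omega
  set L := cs.length with hL
  set q := L / K with hq
  have hfd : PySem.Int.floordiv (L : Int) k = (q : Int) := by
    rw [hkK]
    exact_mod_cast PySem.Int.floordiv_natCast L K
  rw [hfd]
  have hrange : PySem.List.pyRange 0 ((q : Int) * k) k
      = (List.range q).map (fun j => ((K * j : Nat) : Int)) := by
    rw [hkK, PySem.List.pyRange_of_pos 0 ((q : Int) * (K : Int)) (by exact_mod_cast hKpos)]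
    by_cases hq0 : q = 0
    · simp [hq0]
    · have hqpos : 0 < q := Nat.pos_of_ne_zero hq0
      have hcond : (0 : Int) < (q : Int) * (K : Int) := by
        have h1 : (0:Int) < (q:Int) := by exact_mod_cast hqpos
        have h2 : (0:Int) < (K:Int) := by exact_mod_cast hKpos
        exact mul_pos h1 h2
      rw [if_pos hcond]
      have harg : (q : Int) * (K : Int) - 0 + (K : Int) - 1 = ((q * K + K - 1 : Nat) : Int) := by
        have hqk : ((q * K : Nat) : Int) = (q : Int) * (K : Int) := by push_cast; ring
        rw [← hqk]
        omega
      rw [harg]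
      have hdivn : ((q * K + K - 1 : Nat) : Int) / ((K : Nat) : Int)
          = (((q * K + K - 1) / K : Nat) : Int) := (Int.natCast_div _ _).symm
      rw [hdivn]
      have hdq : (q * K + K - 1) / K = q := by
        have h1 : q * K + K - 1 = K * q + (K - 1) := by
          rw [Nat.mul_comm q K]
          omega
        rw [h1, Nat.mul_add_div hKpos, Nat.div_eq_of_lt (by omega)]
        omega
      rw [hdq, Int.toNat_natCast]
      apply List.map_congr_left
      intro j _
      push_cast
      ring
  rw [hrange, List.map_map]
  have hmap : ∀ j ∈ List.range q,
      ((fun i => String.mk (PySem.List.dedup (PySem.List.slice cs (some i) (some (i + k))))) ∘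
        (fun j => ((K * j : Nat) : Int))) j
      = String.mk (PySem.Set.ofList ((cs.drop (K * j)).take K)) := by
    intro j _
    simp only [Function.comp_apply]
    rw [hkK]
    have : ((K * j : Nat) : Int) + (K : Int) = ((K * j : Nat) : Int) + ((K : Nat) : Int) := by
      norm_cast
    rw [this, PySem.List.slice_natCast_add]
    simp [PySem.List.dedup]
  rw [List.map_congr_left hmap]
  rw [← pv_bchunks K hKpos L cs (le_refl _)]
  rw [List.map_map]
  rfl

-- ===== VERDICT (by name: the statement is the Claim_ definition above) =====
theorem merge_the_tools_spec : Claim_equal_merge_the_tools := by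
  intro string k _ hpre
  have hk1 : (1 : Int) ≤ k := hpre
  unfold Spec_merge_the_tools
  rw [pv_alt_eq string k hk1]
  unfold merge_the_tools
  have hempty : (PySem.Set.empty : PySem.Set Char) = ([] : List Char) := rfl
  simp only [hempty]
  rw [pv_fold_diag]
  rw [pv_loop k (by omega : 0 < k) string.toList.length string.toList (le_refl _) 0 []
    (Int.dvd_zero k)]
  simp
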